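-- pv_equiv track=rewrite | github.com/ceryshughes/WordEdgeEnglishSyllabification | generate_wug_onsets.py | classify_profile
-- ===== SOURCE A (Python) =====
-- def classify_profile(sonorities):
--     rise = True
--     fall = True
--     nonmon_rise = True
--     nonmon_fall = True
--     plateau = True
--     previous_level = sonorities[0]
--     for ind, level in enumerate(sonorities):
--         if ind > 0:
--             if level > previous_level:
--                 fall = False
--                 nonmon_fall = False
--                 plateau = False
--             elif level < previous_level:
--                 rise = False
--                 nonmon_rise = False
--                 plateau = False
--             else:
--                 rise = False
--                 fall = False
--     if rise:
--         return "rise"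
--     elif fall:
--         return "fall"
--     elif plateau:
--         return "plateau"
--     elif nonmon_fall:
--         return "nonmonotonic fall"
--     elif nonmon_rise:
--         return "nonmonotonic rise"
--     else:
--         return "other"
-- ===== SOURCE B (Python) =====
-- def classify_profile(sonorities):
--     first = sonorities[0]
--     rest = sonorities[1:]
--     has_up = any(x > first for x in rest)
--     has_down = any(x < first for x in rest)
--     has_eq = any(x == first for x in rest)
--     if not has_down and not has_eq:
--         return "rise"
--     if not has_up and not has_eq:
--         return "fall"
--     if not has_up and not has_down:
--         return "plateau"
--     if not has_up:
--         return "nonmonotonic fall"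
--     if not has_down:
--         return "nonmonotonic rise"
--     return "other"
-- ===== Notes on version B (the rewrite author's own statement) =====
-- stated objective: simpler
-- what changed: B replaces A's five boolean flags mutated inside an indexed enumerate loop by three single-purpose any-scans of the tail against the first element (has_up/has_down/has_eq) followed by a plain priority ladder derived from them.
import Mathlib
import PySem

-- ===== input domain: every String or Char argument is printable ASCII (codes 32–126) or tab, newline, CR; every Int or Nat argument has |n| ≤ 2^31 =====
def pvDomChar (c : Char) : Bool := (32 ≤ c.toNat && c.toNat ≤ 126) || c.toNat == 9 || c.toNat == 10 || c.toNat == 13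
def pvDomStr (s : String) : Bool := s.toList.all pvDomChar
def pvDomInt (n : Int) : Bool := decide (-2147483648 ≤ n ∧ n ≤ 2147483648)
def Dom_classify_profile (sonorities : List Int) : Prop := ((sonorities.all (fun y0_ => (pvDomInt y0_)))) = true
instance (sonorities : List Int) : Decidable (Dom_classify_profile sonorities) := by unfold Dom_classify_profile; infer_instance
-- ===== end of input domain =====

-- B replaces A's five boolean flags mutated in an indexed loop by three any-scans of the
-- tail against the first element plus a priority ladder (objective: simpler).
-- A raises IndexError reading the first element of an empty list; Pre_ excludes exactly that input.

-- ===== PORT A =====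
-- A's loop body: st = (rise, fall, nonmon_rise, nonmon_fall, plateau)
def pvStepA (previous_level : Int) (st : Bool × Bool × Bool × Bool × Bool)
    (p : Int × Int) : Bool × Bool × Bool × Bool × Bool :=
  if p.1 > 0 then
    if p.2 > previous_level then (st.1, false, st.2.2.1, false, false)
    else if p.2 < previous_level then (false, st.2.1, false, st.2.2.2.1, false)
    else (false, false, st.2.2.1, st.2.2.2.1, st.2.2.2.2)
  else st

def classify_profile (sonorities : List Int) : String :=
  let previous_level := sonorities.headD 0   -- first element; Pre_ guarantees nonempty
  let st := (PySem.List.enumerate sonorities).foldl (pvStepA previous_level)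
    (true, true, true, true, true)
  if st.1 then "rise"
  else if st.2.1 then "fall"
  else if st.2.2.2.2 then "plateau"
  else if st.2.2.2.1 then "nonmonotonic fall"
  else if st.2.2.1 then "nonmonotonic rise"
  else "other"

-- ===== PORT B =====
def classify_profile_alt (sonorities : List Int) : String :=
  let first := sonorities.headD 0            -- first element; Pre_ guarantees nonempty
  let rest := sonorities.tail                -- the tail slice
  let has_up := rest.any (fun x => first < x)
  let has_down := rest.any (fun x => x < first)
  let has_eq := rest.any (fun x => x == first)
  if !has_down && !has_eq then "rise"
  else if !has_up && !has_eq then "fall"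
  else if !has_up && !has_down then "plateau"
  else if !has_up then "nonmonotonic fall"
  else if !has_down then "nonmonotonic rise"
  else "other"

-- ===== PRECONDITION & SPEC =====
-- A raises IndexError reading the first element of an empty list; that input is excluded.
def Pre_classify_profile (sonorities : List Int) : Prop := sonorities ≠ []
instance (sonorities : List Int) : Decidable (Pre_classify_profile sonorities) := by
  unfold Pre_classify_profile; infer_instance
def pvWitness_classify_profile : List Int := [1, 2]

def Spec_classify_profile (sonorities : List Int) (out : String) : Prop :=
  out = classify_profile_alt sonorities
instance (sonorities : List Int) (out : String) : Decidable (Spec_classify_profile sonorities out) := by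
  unfold Spec_classify_profile; infer_instance

-- ===== CLAIM =====
def Claim_equal_classify_profile : Prop := ∀ (sonorities : List Int), Dom_classify_profile sonorities → Pre_classify_profile sonorities → Spec_classify_profile sonorities (classify_profile sonorities)

-- ===== LEMMAS AND PROOFS =====

-- A's loop, characterised: from any positive start index the branch 'ind > 0' always fires,
-- and each flag ends as an 'all' over the remaining elements compared with the fixed prev.
theorem foldA (prev : Int) (rest : List Int) : ∀ (k : Int), 1 ≤ k →
    ∀ (st : Bool × Bool × Bool × Bool × Bool),
    (PySem.List.enumerate rest k).foldl (pvStepA prev) st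
    = (st.1 && rest.all (fun x => decide (prev < x)),
       st.2.1 && rest.all (fun x => decide (x < prev)),
       st.2.2.1 && rest.all (fun x => !decide (x < prev)),
       st.2.2.2.1 && rest.all (fun x => !decide (prev < x)),
       st.2.2.2.2 && rest.all (fun x => x == prev)) := by
  induction rest with
  | nil => intro k hk st; simp [PySem.List.enumerate_nil]
  | cons x t ih =>
    intro k hk st
    rw [PySem.List.enumerate_cons]
    simp only [List.foldl_cons]
    rw [show pvStepA prev st (k, x) = (if x > prev then (st.1, false, st.2.2.1, false, false)
      else if x < prev then (false, st.2.1, false, st.2.2.2.1, false)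
      else (false, false, st.2.2.1, st.2.2.2.1, st.2.2.2.2)) by
      unfold pvStepA; rw [if_pos (by omega : (k, x).1 > 0)]]
    rcases lt_trichotomy prev x with h | h | h
    · rw [if_pos (by exact h : x > prev), ih (k + 1) (by omega)]
      simp [List.all_cons, h, show ¬(x < prev) by omega, show (x == prev) = false by
        simp [beq_iff_eq]; omega]
    · rw [if_neg (by omega : ¬ x > prev), if_neg (by omega : ¬ x < prev),
        ih (k + 1) (by omega)]
      simp [List.all_cons, show ¬(prev < x) by omega, show ¬(x < prev) by omega,
        show (x == prev) = true by simp [beq_iff_eq]; omega]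
    · rw [if_neg (by omega : ¬ x > prev), if_pos (by exact h : x < prev),
        ih (k + 1) (by omega)]
      simp [List.all_cons, h, show ¬(prev < x) by omega, show (x == prev) = false by
        simp [beq_iff_eq]; omega]

-- Each 'all' flag of A, rewritten through B's three 'any' booleans.
theorem allGT_eq (prev : Int) (l : List Int) :
    l.all (fun x => decide (prev < x))
      = (!l.any (fun x => decide (x < prev)) && !l.any (fun x => x == prev)) := by
  induction l with
  | nil => rfl
  | cons x t ih =>
    simp only [List.all_cons, List.any_cons, ih]
    rcases lt_trichotomy prev x with h | h | h
    · have h2 : ¬ x < prev := by omega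
      have h3 : (x == prev) = false := by simp [beq_iff_eq]; omega
      simp [h, h2, h3]
    · have h2 : ¬ prev < x := by omega
      have h3 : (x == prev) = true := by simp [beq_iff_eq]; omega
      simp [h, h2, h3]
    · have h2 : ¬ prev < x := by omega
      have h3 : (x == prev) = false := by simp [beq_iff_eq]; omega
      simp [h, h2, h3]

theorem allLT_eq (prev : Int) (l : List Int) :
    l.all (fun x => decide (x < prev))
      = (!l.any (fun x => decide (prev < x)) && !l.any (fun x => x == prev)) := by
  induction l with
  | nil => rfl
  | cons x t ih =>
    simp only [List.all_cons, List.any_cons, ih]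
    rcases lt_trichotomy prev x with h | h | h
    · have h2 : ¬ x < prev := by omega
      have h3 : (x == prev) = false := by simp [beq_iff_eq]; omega
      simp [h, h2, h3]
    · have h2 : ¬ prev < x := by omega
      have h3 : (x == prev) = true := by simp [beq_iff_eq]; omega
      simp [h, h2, h3]
    · have h2 : ¬ prev < x := by omega
      have h3 : (x == prev) = false := by simp [beq_iff_eq]; omega
      simp [h, h2, h3]

theorem allNLT_eq (prev : Int) (l : List Int) :
    l.all (fun x => !decide (x < prev)) = !l.any (fun x => decide (x < prev)) := by
  induction l with
  | nil => rfl
  | cons x t ih => simp [List.all_cons, List.any_cons, ih]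

theorem allNGT_eq (prev : Int) (l : List Int) :
    l.all (fun x => !decide (prev < x)) = !l.any (fun x => decide (prev < x)) := by
  induction l with
  | nil => rfl
  | cons x t ih => simp [List.all_cons, List.any_cons, ih]

theorem allEQ_eq (prev : Int) (l : List Int) :
    l.all (fun x => x == prev)
      = (!l.any (fun x => decide (prev < x)) && !l.any (fun x => decide (x < prev))) := by
  induction l with
  | nil => rfl
  | cons x t ih =>
    simp only [List.all_cons, List.any_cons, ih]
    rcases lt_trichotomy prev x with h | h | h
    · have h2 : ¬ x < prev := by omega
      have h3 : (x == prev) = false := by simp [beq_iff_eq]; omega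
      simp [h, h2, h3]
    · have h2 : ¬ prev < x := by omega
      have h3 : (x == prev) = true := by simp [beq_iff_eq]; omega
      simp [h, h2, h3]
    · have h2 : ¬ prev < x := by omega
      have h3 : (x == prev) = false := by simp [beq_iff_eq]; omega
      simp [h, h2, h3]

theorem pvStepA_zero (prev : Int) (st : Bool × Bool × Bool × Bool × Bool) (x : Int) :
    pvStepA prev st (0, x) = st := by
  unfold pvStepA; rw [if_neg (by omega : ¬ ((0 : Int), x).1 > 0)]

-- ===== VERDICT =====
theorem classify_profile_spec : Claim_equal_classify_profile := by
  intro s _ hpre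
  show classify_profile s = classify_profile_alt s
  cases s with
  | nil => exact absurd rfl hpre
  | cons a t =>
    simp only [classify_profile, classify_profile_alt, List.headD_cons, List.tail_cons,
      PySem.List.enumerate_cons, List.foldl_cons]
    simp only [pvStepA_zero, foldA a t (0 + 1) (by omega)]
    simp only [Bool.true_and, allGT_eq, allLT_eq, allNLT_eq, allNGT_eq, allEQ_eq]
    rfl
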